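-- pv_equiv track=rewrite | github.com/zlaom/2022_GAIIC_Task1_1st | data_pre/cls_match_dataset.py | get_positive_negative_dict
-- ===== SOURCE A (Python) =====
-- import itertools
--
-- def get_positive_negative_dict(attr_dict):
--     negative_dict = {}
--     positive_dict = {}
--     for query, attr_list in attr_dict.items():
--         for i, attrs in enumerate(attr_list):
--             for attr in attrs:
--                 l = attr_list.copy()
--                 l.pop(i)
--                 negative_dict[attr] = list(itertools.chain.from_iterable(l))
--                 positive_dict[attr] = attrs
--     return positive_dict, negative_dict
-- ===== SOURCE B (Python) =====
-- def get_positive_negative_dict(attr_dict):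
--     # Stage 1: one pass producing (attr, positive, negative) entries using running
--     # prefix/suffix flattened lists (negative built once per group, shared).
--     entries = []
--     for query, attr_list in attr_dict.items():
--         suffix = [a for g in attr_list for a in g]
--         prefix = []
--         for attrs in attr_list:
--             suffix = suffix[len(attrs):]
--             neg = prefix + suffix
--             entries.extend((attr, attrs, neg) for attr in attrs)
--             prefix = prefix + attrs
--     # Stage 2: build both dicts from the entry stream (last entry per attr wins,
--     # exactly like repeated dict assignment).
--     positive_dict = {attr: pos for attr, pos, neg in entries}
--     negative_dict = {attr: neg for attr, pos, neg in entries}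
--     return positive_dict, negative_dict
-- ===== Notes on version B (the rewrite author's own statement) =====
-- stated objective: alternative
-- what changed: B is a two-stage pipeline: one pass per query builds a flat (attr, positive, negative) entry stream using running prefix/suffix flattened lists (each group's negative list built once and shared), then both dicts are built from that stream by comprehensions; A instead copies the group list, pops index i and re-flattens it for every single attribute while updating both dicts in place.
import Mathlib
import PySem

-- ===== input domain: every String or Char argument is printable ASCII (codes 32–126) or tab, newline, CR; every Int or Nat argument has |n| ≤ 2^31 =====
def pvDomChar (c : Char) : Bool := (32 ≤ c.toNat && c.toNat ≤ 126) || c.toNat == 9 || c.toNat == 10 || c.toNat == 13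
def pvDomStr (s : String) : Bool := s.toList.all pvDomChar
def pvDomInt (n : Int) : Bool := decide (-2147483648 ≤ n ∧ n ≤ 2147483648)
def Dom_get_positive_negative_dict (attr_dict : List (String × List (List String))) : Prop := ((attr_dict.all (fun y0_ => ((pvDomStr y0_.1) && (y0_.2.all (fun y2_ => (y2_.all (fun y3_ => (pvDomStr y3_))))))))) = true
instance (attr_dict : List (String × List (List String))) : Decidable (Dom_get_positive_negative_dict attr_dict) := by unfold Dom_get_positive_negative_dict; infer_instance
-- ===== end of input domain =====

-- B is a two-stage pipeline (flat entry stream via running prefix/suffix, then two dict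
-- comprehensions) instead of A's per-attribute copy/pop/re-flatten with in-place dict updates.

-- ===== PORT A =====
-- state: (positive_dict, negative_dict); `for i, attrs in enumerate(attr_list)` is a fold
-- carrying the index; `l = attr_list.copy(); l.pop(i)` with i < len is `attr_list.eraseIdx i`;
-- `list(itertools.chain.from_iterable(l))` is `l.flatten`
def aQuery (attr_list : List (List String))
    (st : PySem.Dict String (List String) × PySem.Dict String (List String)) :
    PySem.Dict String (List String) × PySem.Dict String (List String) :=
  (attr_list.foldl
    (fun (p : (PySem.Dict String (List String) × PySem.Dict String (List String)) × Nat) attrs =>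
      (attrs.foldl
        (fun st3 attr =>
          let l := attr_list.eraseIdx p.2
          (st3.1.insert attr attrs, st3.2.insert attr l.flatten)) p.1,
       p.2 + 1))
    (st, 0)).1

def get_positive_negative_dict (attr_dict : List (String × List (List String))) : (List (String × List String)) × (List (String × List String)) :=
  let st := attr_dict.foldl (fun st qa => aQuery qa.2 st) (PySem.Dict.empty, PySem.Dict.empty)
  (st.1.items, st.2.items)

-- ===== PORT B =====
-- stage 1: the entry stream for one query, by structural recursion on the groups, carrying the
-- running flattened prefix and suffix (`suffix[len(attrs):]` with nonnegative index = drop;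
-- `entries.extend(… for attr in attrs)` = map ++)
def bEntries (pre suf : List String) : List (List String) → List (String × List String × List String)
  | [] => []
  | attrs :: rest =>
      let suf' := suf.drop attrs.length
      attrs.map (fun attr => (attr, attrs, pre ++ suf')) ++ bEntries (pre ++ attrs) suf' rest

-- stage 2: a dict comprehension over the stream (last assignment per key wins)
def bComp (f : String × List String × List String → List String)
    (entries : List (String × List String × List String)) : PySem.Dict String (List String) :=
  entries.foldl (fun d e => d.insert e.1 (f e)) PySem.Dict.empty

def get_positive_negative_dict_alt (attr_dict : List (String × List (List String))) : (List (String × List String)) × (List (String × List String)) :=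
  let entries := attr_dict.flatMap (fun qa => bEntries [] (qa.2.flatMap id) qa.2)
  ((bComp (fun e => e.2.1) entries).items, (bComp (fun e => e.2.2) entries).items)

-- ===== PRECONDITION & SPEC =====
def Spec_get_positive_negative_dict (attr_dict : List (String × List (List String))) (out : (List (String × List String)) × (List (String × List String))) : Prop := out = get_positive_negative_dict_alt attr_dict
instance (attr_dict : List (String × List (List String))) (out : (List (String × List String)) × (List (String × List String))) : Decidable (Spec_get_positive_negative_dict attr_dict out) := by unfold Spec_get_positive_negative_dict; infer_instance

-- ===== CLAIM (what is proved, stated in full; the proofs are below) =====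
def Claim_equal_get_positive_negative_dict : Prop := ∀ (attr_dict : List (String × List (List String))), Dom_get_positive_negative_dict attr_dict → Spec_get_positive_negative_dict attr_dict (get_positive_negative_dict attr_dict)

-- ===== LEMMAS AND PROOFS =====

-- simultaneous insertion of a triple into both dicts
def pairIns (st : PySem.Dict String (List String) × PySem.Dict String (List String))
    (e : String × List String × List String) :
    PySem.Dict String (List String) × PySem.Dict String (List String) :=
  (st.1.insert e.1 e.2.1, st.2.insert e.1 e.2.2)

theorem foldl_map_pairIns (gs attrs neg : List String)
    (st0 : PySem.Dict String (List String) × PySem.Dict String (List String)) :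
    gs.foldl (fun st3 attr => (st3.1.insert attr attrs, st3.2.insert attr neg)) st0
    = (gs.map (fun attr => (attr, attrs, neg))).foldl pairIns st0 := by
  induction gs generalizing st0 with
  | nil => rfl
  | cons a t ih => simp [pairIns, ih]

theorem eraseIdx_append_cons (pre : List (List String)) (g : List String) (rest : List (List String)) :
    (pre ++ g :: rest).eraseIdx pre.length = pre ++ rest := by
  induction pre with
  | nil => rfl
  | cons h t ih => simp [ih]

-- A's double loop over one query equals a single foldl of pairIns over B's entry stream
theorem aQuery_inv (pre rest : List (List String))
    (st : PySem.Dict String (List String) × PySem.Dict String (List String)) :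
    (rest.foldl
      (fun (p : (PySem.Dict String (List String) × PySem.Dict String (List String)) × Nat) attrs =>
        (attrs.foldl
          (fun st3 attr =>
            let l := (pre ++ rest).eraseIdx p.2
            (st3.1.insert attr attrs, st3.2.insert attr l.flatten)) p.1,
         p.2 + 1))
      (st, pre.length)).1
    = (bEntries pre.flatten rest.flatten rest).foldl pairIns st := by
  induction rest generalizing pre st with
  | nil => rfl
  | cons g rest' ih =>
    have e1 : (pre ++ g :: rest').eraseIdx pre.length = pre ++ rest' :=
      eraseIdx_append_cons pre g rest'
    have hinner : ∀ st0 : PySem.Dict String (List String) × PySem.Dict String (List String),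
        g.foldl (fun st3 attr =>
          (st3.1.insert attr g, st3.2.insert attr (pre.flatten ++ rest'.flatten))) st0
        = (g.map (fun attr => (attr, g, pre.flatten ++ rest'.flatten))).foldl pairIns st0 :=
      fun st0 => foldl_map_pairIns g g (pre.flatten ++ rest'.flatten) st0
    have h := ih (pre ++ [g])
      (g.foldl (fun st3 attr => (st3.1.insert attr g, st3.2.insert attr (pre ++ rest').flatten)) st)
    simp only [List.foldl_cons, List.length_append, List.length_cons, List.length_nil,
      Nat.zero_add, List.append_assoc, List.cons_append, List.nil_append,
      List.flatten_append, List.flatten_cons, List.flatten_nil, List.append_nil, e1] at h ⊢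
    rw [bEntries]
    simp only [List.foldl_append, List.drop_left, hinner] at h ⊢
    exact h

theorem aQuery_eq_entries (attr_list : List (List String))
    (st : PySem.Dict String (List String) × PySem.Dict String (List String)) :
    aQuery attr_list st = (bEntries [] (attr_list.flatMap id) attr_list).foldl pairIns st := by
  have h := aQuery_inv [] attr_list st
  simpa [aQuery, List.flatMap_id] using h

-- the whole A fold is a pairIns fold over the concatenated entry stream
theorem aFold_eq (l : List (String × List (List String)))
    (st : PySem.Dict String (List String) × PySem.Dict String (List String)) :
    l.foldl (fun st qa => aQuery qa.2 st) st
    = (l.flatMap (fun qa => bEntries [] (qa.2.flatMap id) qa.2)).foldl pairIns st := by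
  induction l generalizing st with
  | nil => rfl
  | cons h t ih =>
    rw [List.foldl_cons, aQuery_eq_entries, List.flatMap_cons, List.foldl_append, ih]

-- a pairIns fold splits into the two comprehension folds
theorem pairIns_split (entries : List (String × List String × List String))
    (d1 d2 : PySem.Dict String (List String)) :
    entries.foldl pairIns (d1, d2)
    = (entries.foldl (fun d e => d.insert e.1 e.2.1) d1,
       entries.foldl (fun d e => d.insert e.1 e.2.2) d2) := by
  induction entries generalizing d1 d2 with
  | nil => rfl
  | cons e t ih => simp [pairIns, ih]

-- ===== VERDICT (by name: the statement is the Claim_ definition above) =====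
theorem get_positive_negative_dict_spec : Claim_equal_get_positive_negative_dict := by
  intro attr_dict _
  unfold Spec_get_positive_negative_dict get_positive_negative_dict get_positive_negative_dict_alt bComp
  rw [aFold_eq, pairIns_split]
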